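-- pv_equiv track=rewrite | github.com/duttosourav8/Optimized-Cygnet | history_validity_gate.py | build_sr_history
-- ===== SOURCE A (Python) =====
-- from typing import Dict, List, Tuple, Union
--
-- Triple = Tuple[int, int, int, int]
--
-- def build_sr_history(triples: List[Triple]) -> Dict[Tuple[int, int], Dict[int, List[int]]]:
--     sr_hist: Dict[Tuple[int, int], Dict[int, List[int]]] = {}
--     for s, r, o, t in triples:
--         sr_hist.setdefault((s, r), {}).setdefault(o, []).append(t)
--
--     for sr_key in sr_hist:
--         for obj in sr_hist[sr_key]:
--             sr_hist[sr_key][obj].sort()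
--
--     return sr_hist
-- ===== SOURCE B (Python) =====
-- def build_sr_history(triples):
--     # Staged, filter-based construction: extract the distinct (s, r) keys in
--     # first-occurrence order, then for each key build its object dict by
--     # scanning/filtering the input, sorting each timestamp list once.
--     keys = list(dict.fromkeys((s, r) for s, r, _, _ in triples))
--     result = {}
--     for k in keys:
--         group = [(o, t) for s, r, o, t in triples if (s, r) == k]
--         objs = list(dict.fromkeys(o for o, _ in group))
--         result[k] = {o: sorted(t for oo, t in group if oo == o) for o in objs}
--     return result
-- ===== Notes on version B (the rewrite author's own statement) =====
-- stated objective: alternative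
-- what changed: B drops A's incremental nested setdefault dict and trailing double sort loop: it first extracts the distinct (s,r) keys in first-occurrence order, then builds each key's object dict by filtering the input and sorting each timestamp list exactly once as it is placed.
import Mathlib
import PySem

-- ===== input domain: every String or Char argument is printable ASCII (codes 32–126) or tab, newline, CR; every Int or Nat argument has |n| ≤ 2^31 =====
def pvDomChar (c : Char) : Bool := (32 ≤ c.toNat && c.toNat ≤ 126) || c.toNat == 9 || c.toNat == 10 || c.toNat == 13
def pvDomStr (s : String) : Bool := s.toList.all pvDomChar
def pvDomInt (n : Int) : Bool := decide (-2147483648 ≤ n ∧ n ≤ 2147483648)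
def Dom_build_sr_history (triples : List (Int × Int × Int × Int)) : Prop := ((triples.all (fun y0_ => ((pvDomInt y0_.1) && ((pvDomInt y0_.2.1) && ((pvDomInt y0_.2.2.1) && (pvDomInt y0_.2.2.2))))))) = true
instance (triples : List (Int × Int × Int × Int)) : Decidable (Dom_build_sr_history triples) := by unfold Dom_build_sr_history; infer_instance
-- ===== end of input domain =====

-- B replaces A's incremental nested setdefault dict plus trailing double sort loop by a staged
-- filter-based construction (distinct keys first, then each group by filtering, each list sorted
-- once as placed); same output, order included; an alternative of different shape, not faster.

-- ===== PORT A =====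
-- Python dicts are PySem.Dict; `sr_hist.setdefault((s,r),{}).setdefault(o,[]).append(t)` is the
-- in-place nested update, i.e. nested Dict.modify. The trailing `for sr_key: for obj: .sort()`
-- is the map applying PySem.List.sorted to every inner list.
def build_sr_history (triples : List (Int × Int × Int × Int)) : List (Int × Int × List (Int × List Int)) :=
  let srHist : PySem.Dict (Int × Int) (PySem.Dict Int (List Int)) :=
    triples.foldl (fun d x =>
      d.modify (x.1, x.2.1) PySem.Dict.empty (fun inner => inner.modify x.2.2.1 [] (· ++ [x.2.2.2])))
      PySem.Dict.empty
  let srHist2 : PySem.Dict (Int × Int) (PySem.Dict Int (List Int)) :=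
    PySem.Dict.mk (srHist.items.map (fun p =>
      (p.1, PySem.Dict.mk (p.2.items.map (fun q => (q.1, PySem.List.sorted q.2 (fun v => v) false))))))
  srHist2.items.map (fun p => (p.1.1, p.1.2, p.2.items))

-- ===== PORT B =====
-- Source B: `dict.fromkeys` keeps the distinct elements in first-occurrence order = PySem.Set.ofList;
-- the comprehensions are List.filter/List.map; `result[k] = {...}` inserts a fresh key per loop
-- step, so result.items is the map over `keys`; `sorted(...)` is PySem.List.sorted.
def build_sr_history_alt (triples : List (Int × Int × Int × Int)) : List (Int × Int × List (Int × List Int)) :=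
  let keys := PySem.Set.ofList (triples.map (fun x => (x.1, x.2.1)))
  keys.map (fun k =>
    let group := (triples.filter (fun x => (x.1, x.2.1) == k)).map (fun x => (x.2.2.1, x.2.2.2))
    let objs := PySem.Set.ofList (group.map (fun p => p.1))
    (k.1, k.2, objs.map (fun o =>
      (o, PySem.List.sorted ((group.filter (fun p => p.1 == o)).map (fun p => p.2)) (fun v => v) false))))

-- ===== PRECONDITION & SPEC =====
def Spec_build_sr_history (triples : List (Int × Int × Int × Int)) (out : List (Int × Int × List (Int × List Int))) : Prop := out = build_sr_history_alt triples
instance (triples : List (Int × Int × Int × Int)) (out : List (Int × Int × List (Int × List Int))) : Decidable (Spec_build_sr_history triples out) := by unfold Spec_build_sr_history; infer_instance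

-- ===== CLAIM (what is proved, stated in full; the proofs are below) =====
def Claim_equal_build_sr_history : Prop := ∀ (triples : List (Int × Int × Int × Int)), Dom_build_sr_history triples → Spec_build_sr_history triples (build_sr_history triples)

-- ===== LEMMAS AND PROOFS =====

theorem pv_getD_foldl_modify_key {κ ν β : Type} [BEq κ] [LawfulBEq κ] [DecidableEq κ]
    (l : List β) (key : β → κ) (d0 : ν) (g : β → ν → ν) (d : PySem.Dict κ ν) (k : κ) :
    (l.foldl (fun d x => d.modify (key x) d0 (g x)) d).getD k d0
      = (l.filter (fun x => key x == k)).foldl (fun v x => g x v) (d.getD k d0) := by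
  induction l generalizing d with
  | nil => rfl
  | cons x l ih =>
    simp only [List.foldl_cons, List.filter_cons]
    rw [ih]
    by_cases h : key x = k
    · subst h
      simp
    · have hb : (key x == k) = false := by simp [h]
      rw [hb]
      simp only [Bool.false_eq_true, if_false]
      rw [PySem.Dict.getD_modify]
      simp [Ne.symm h]

-- flat grouping characterization of a foldl of Dict.modify-append
theorem pv_flat_items {κ γ β : Type} [BEq κ] [LawfulBEq κ] [DecidableEq κ]
    (l : List β) (key : β → κ) (tv : β → γ) :
    (l.foldl (fun d x => d.modify (key x) [] (· ++ [tv x])) PySem.Dict.empty).items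
      = (PySem.Set.ofList (l.map key)).map
          (fun c => (c, (l.filter (fun x => key x == c)).map tv)) := by
  have hkeys : (l.foldl (fun d x => d.modify (key x) [] (· ++ [tv x])) PySem.Dict.empty).keys
      = PySem.Set.ofList (l.map key) := by
    have := PySem.Dict.keys_foldl_modify_key l key ([] : List γ)
      (fun _ x v => v ++ [tv x]) PySem.Dict.empty
    rw [PySem.Dict.keys_empty, PySem.Set.update_nil_left] at this
    exact this
  have hnodup : (l.foldl (fun d x => d.modify (key x) [] (· ++ [tv x])) PySem.Dict.empty).keys.Nodup := by
    exact PySem.Dict.nodup_keys_foldl_modify_key l key ([] : List γ)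
      (fun _ x v => v ++ [tv x]) PySem.Dict.empty PySem.Dict.nodup_keys_empty
  rw [PySem.Dict.items_eq_map_keys _ hnodup ([] : List γ), hkeys]
  apply List.map_congr_left
  intro c _
  have hg : (l.foldl (fun d x => d.modify (key x) [] (· ++ [tv x])) PySem.Dict.empty).getD c []
      = (l.filter (fun x => key x == c)).map tv := by
    have h1 : l.foldl (fun d x => d.modify (key x) [] (· ++ [tv x])) PySem.Dict.empty
        = (l.map (fun x => (key x, tv x))).foldl
            (fun d p => d.modify p.1 [] (· ++ [p.2])) PySem.Dict.empty := by
      rw [List.foldl_map]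
    rw [h1, PySem.Dict.getD_foldl_modify_append, PySem.Dict.getD_empty, List.filter_map]
    simp [List.map_map, Function.comp_def]
  rw [hg]

theorem pv_main_eq (triples : List (Int × Int × Int × Int)) :
    build_sr_history triples = build_sr_history_alt triples := by
  -- A characterized as nested first-occurrence grouping by filtering
  have hNkeys : (triples.foldl (fun d x =>
      d.modify (x.1, x.2.1) PySem.Dict.empty (fun inner => inner.modify x.2.2.1 [] (· ++ [x.2.2.2])))
      PySem.Dict.empty).keys = PySem.Set.ofList (triples.map (fun x => (x.1, x.2.1))) := by
    have h := PySem.Dict.keys_foldl_modify_key triples (fun x => (x.1, x.2.1))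
      (PySem.Dict.empty : PySem.Dict Int (List Int))
      (fun _ x inner => inner.modify x.2.2.1 [] (· ++ [x.2.2.2])) PySem.Dict.empty
    rw [PySem.Dict.keys_empty, PySem.Set.update_nil_left] at h
    exact h
  have hNnodup : (triples.foldl (fun d x =>
      d.modify (x.1, x.2.1) PySem.Dict.empty (fun inner => inner.modify x.2.2.1 [] (· ++ [x.2.2.2])))
      PySem.Dict.empty).keys.Nodup :=
    PySem.Dict.nodup_keys_foldl_modify_key triples (fun x => (x.1, x.2.1))
      (PySem.Dict.empty : PySem.Dict Int (List Int))
      (fun _ x inner => inner.modify x.2.2.1 [] (· ++ [x.2.2.2])) PySem.Dict.empty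
      PySem.Dict.nodup_keys_empty
  have hNgetD : ∀ k : Int × Int,
      (triples.foldl (fun d x =>
        d.modify (x.1, x.2.1) PySem.Dict.empty (fun inner => inner.modify x.2.2.1 [] (· ++ [x.2.2.2])))
        PySem.Dict.empty).getD k PySem.Dict.empty
      = (triples.filter (fun x => (x.1, x.2.1) == k)).foldl
          (fun inner x => inner.modify x.2.2.1 [] (· ++ [x.2.2.2])) PySem.Dict.empty := by
    intro k
    have h := pv_getD_foldl_modify_key triples (fun x => (x.1, x.2.1))
      (PySem.Dict.empty : PySem.Dict Int (List Int))
      (fun x inner => inner.modify x.2.2.1 [] (· ++ [x.2.2.2])) PySem.Dict.empty k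
    rw [PySem.Dict.getD_empty] at h
    exact h
  have hA : build_sr_history triples
      = (PySem.Set.ofList (triples.map (fun x => (x.1, x.2.1)))).map (fun k =>
          (k.1, k.2,
            (PySem.Set.ofList ((triples.filter (fun x => (x.1, x.2.1) == k)).map (fun x => x.2.2.1))).map
              (fun o => (o, PySem.List.sorted
                (((triples.filter (fun x => (x.1, x.2.1) == k)).filter (fun x => x.2.2.1 == o)).map
                  (fun x => x.2.2.2)) (fun v => v) false)))) := by
    show (PySem.Dict.mk (((triples.foldl (fun d x =>
        d.modify (x.1, x.2.1) PySem.Dict.empty (fun inner => inner.modify x.2.2.1 [] (· ++ [x.2.2.2])))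
        PySem.Dict.empty).items).map (fun p =>
          (p.1, PySem.Dict.mk (p.2.items.map (fun q => (q.1, PySem.List.sorted q.2 (fun v => v) false))))))).items.map
        (fun p => (p.1.1, p.1.2, p.2.items)) = _
    show (((triples.foldl (fun d x =>
        d.modify (x.1, x.2.1) PySem.Dict.empty (fun inner => inner.modify x.2.2.1 [] (· ++ [x.2.2.2])))
        PySem.Dict.empty).items).map (fun p =>
          (p.1, PySem.Dict.mk (p.2.items.map (fun q => (q.1, PySem.List.sorted q.2 (fun v => v) false)))))).map
        (fun p => (p.1.1, p.1.2, p.2.items)) = _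
    rw [List.map_map, PySem.Dict.items_eq_map_keys _ hNnodup PySem.Dict.empty, List.map_map, hNkeys]
    apply List.map_congr_left
    intro k _
    simp only [Function.comp_def]
    rw [hNgetD k]
    rw [pv_flat_items (triples.filter (fun x => (x.1, x.2.1) == k)) (fun x => x.2.2.1) (fun x => x.2.2.2),
        List.map_map]
    rfl
  -- B is that characterization up to pushing map through filter
  rw [hA]
  show _ = (PySem.Set.ofList (triples.map (fun x => (x.1, x.2.1)))).map (fun k => _)
  apply List.map_congr_left
  intro k _
  simp only [List.map_map, List.filter_map, Function.comp_def]
-- ===== VERDICT (by name: the statement is the Claim_ definition above) =====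
theorem build_sr_history_spec : Claim_equal_build_sr_history := by
  intro triples _
  unfold Spec_build_sr_history
  exact pv_main_eq triples
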